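-- pv_equiv track=rewrite | github.com/chipsec/chipsec | scripts/amd_ppr_pdf_to_xml.py | calc_register_size
-- ===== SOURCE A (Python) =====
-- def calc_register_size(fields: list) -> int:
--     """Calculate register size in bytes based on highest bit position."""
--     if not fields:
--         return 4
--     max_bit = max(f['bit'] + f['size'] - 1 for f in fields)
--     if max_bit <= 7:
--         return 1
--     elif max_bit <= 15:
--         return 2
--     elif max_bit <= 31:
--         return 4
--     return 8
-- ===== SOURCE B (Python) =====
-- def calc_register_size(fields: list) -> int:
--     """Calculate register size in bytes based on highest bit position."""
--     if not fields:
--         return 4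
--     # Map each field independently to the byte size it needs (power of two,
--     # capped at 8, via bit_length), then take the max of those sizes.
--     return max(
--         min(8, 1 << max(0, max(f['bit'] + f['size'] - 1, 0).bit_length() - 3))
--         for f in fields
--     )
-- ===== Notes on version B (the rewrite author's own statement) =====
-- stated objective: alternative
-- what changed: B maps each field independently to its own byte size via bit-length arithmetic (min(8, 1 << bit_length(top)//buckets)) and takes the max of those per-field sizes, instead of A's global max over bit positions followed by an if/elif threshold ladder; correctness rests on the size map being monotone, so max commutes with it.
import Mathlib
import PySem

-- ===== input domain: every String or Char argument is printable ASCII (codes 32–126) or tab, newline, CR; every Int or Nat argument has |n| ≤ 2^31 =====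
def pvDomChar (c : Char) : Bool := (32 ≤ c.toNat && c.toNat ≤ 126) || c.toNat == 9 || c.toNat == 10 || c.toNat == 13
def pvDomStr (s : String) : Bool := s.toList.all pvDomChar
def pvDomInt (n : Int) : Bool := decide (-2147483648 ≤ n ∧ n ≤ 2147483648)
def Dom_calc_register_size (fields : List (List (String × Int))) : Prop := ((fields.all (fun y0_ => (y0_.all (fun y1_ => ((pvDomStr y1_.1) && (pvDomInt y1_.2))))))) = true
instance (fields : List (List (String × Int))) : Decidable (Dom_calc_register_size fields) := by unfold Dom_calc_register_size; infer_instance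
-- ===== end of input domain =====

-- B computes each field's own byte size with bit-length arithmetic (no threshold
-- ladder) and takes the max of those sizes; A takes the max bit then classifies.


-- ===== PORT A =====
-- f['bit'] / f['size']: dict lookup (first match on the association list); under
-- Pre_ the keys are present, so the 0 default of getD is never used.
def calc_register_size (fields : List (List (String × Int))) : Int :=
  if fields = [] then 4
  else
    let maxBit := (PySem.List.max?
      (fields.map (fun f => (f.lookup "bit").getD 0 + (f.lookup "size").getD 0 - 1))
      (fun x => x)).getD 0
    if maxBit ≤ 7 then 1
    else if maxBit ≤ 15 then 2
    else if maxBit ≤ 31 then 4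
    else 8

-- ===== PORT B =====
-- per-field size: min(8, 1 << max(0, max(bit+size-1, 0).bit_length() - 3)).
-- bit_length on a nonnegative int is Nat.size; 1 << k is 2 ^ k.
def pvFieldSize (f : List (String × Int)) : Int :=
  let m := (f.lookup "bit").getD 0 + (f.lookup "size").getD 0 - 1
  min 8 ((2 : Int) ^ (max 0 ((Nat.size (max m 0).toNat : Int) - 3)).toNat)

def calc_register_size_alt (fields : List (List (String × Int))) : Int :=
  if fields = [] then 4
  else (PySem.List.max? (fields.map pvFieldSize) (fun x => x)).getD 0

-- ===== PRECONDITION & SPEC =====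
-- Pre_ excludes exactly the inputs on which Python A raises KeyError: a field
-- dict missing the 'bit' or 'size' key.
def Pre_calc_register_size (fields : List (List (String × Int))) : Prop :=
  ∀ f ∈ fields, (f.lookup "bit").isSome ∧ (f.lookup "size").isSome
instance (fields : List (List (String × Int))) : Decidable (Pre_calc_register_size fields) := by unfold Pre_calc_register_size; infer_instance
def pvWitness_calc_register_size : (List (List (String × Int))) := [[("bit", 0), ("size", 1)]]
def Spec_calc_register_size (fields : List (List (String × Int))) (out : Int) : Prop := out = calc_register_size_alt fields
instance (fields : List (List (String × Int))) (out : Int) : Decidable (Spec_calc_register_size fields out) := by unfold Spec_calc_register_size; infer_instance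

-- ===== CLAIM (what is proved, stated in full; the proofs are below) =====
def Claim_equal_calc_register_size : Prop := ∀ (fields : List (List (String × Int))), Dom_calc_register_size fields → Pre_calc_register_size fields → Spec_calc_register_size fields (calc_register_size fields)

-- ===== LEMMAS AND PROOFS =====
-- A's classification ladder, as a function (definitionally the body of port A)
def pvLadder (m : Int) : Int :=
  if m ≤ 7 then 1 else if m ≤ 15 then 2 else if m ≤ 31 then 4 else 8

-- B's per-field size map agrees with A's ladder pointwise
theorem fieldSize_eq_ladder (f : List (String × Int)) :
    pvFieldSize f = pvLadder ((f.lookup "bit").getD 0 + (f.lookup "size").getD 0 - 1) := by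
  unfold pvFieldSize pvLadder
  set m : Int := (f.lookup "bit").getD 0 + (f.lookup "size").getD 0 - 1 with hm
  clear_value m
  by_cases h1 : m ≤ 7
  · have hn : (max m 0).toNat < 2 ^ 3 := by omega
    have hs : Nat.size (max m 0).toNat ≤ 3 := Nat.size_le.mpr hn
    have : (max 0 ((Nat.size (max m 0).toNat : Int) - 3)).toNat = 0 := by omega
    simp [h1, this]
  · by_cases h2 : m ≤ 15
    · have hlo : 2 ^ 3 ≤ (max m 0).toNat := by omega
      have hhi : (max m 0).toNat < 2 ^ 4 := by omega
      have hs : Nat.size (max m 0).toNat = 4 :=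
        le_antisymm (Nat.size_le.mpr hhi) (Nat.lt_size.mpr hlo)
      have : (max 0 ((Nat.size (max m 0).toNat : Int) - 3)).toNat = 1 := by
        rw [hs]; rfl
      simp [h1, h2, this]
    · by_cases h3 : m ≤ 31
      · have hlo : 2 ^ 4 ≤ (max m 0).toNat := by omega
        have hhi : (max m 0).toNat < 2 ^ 5 := by omega
        have hs : Nat.size (max m 0).toNat = 5 :=
          le_antisymm (Nat.size_le.mpr hhi) (Nat.lt_size.mpr hlo)
        have : (max 0 ((Nat.size (max m 0).toNat : Int) - 3)).toNat = 2 := by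
          rw [hs]; rfl
        simp [h1, h2, h3, this]
      · have hlo : 2 ^ 5 ≤ (max m 0).toNat := by omega
        have hs : 6 ≤ Nat.size (max m 0).toNat := Nat.lt_size.mpr hlo
        have hk : 3 ≤ (max 0 ((Nat.size (max m 0).toNat : Int) - 3)).toNat := by omega
        have h8 : (8 : Int) ≤ 2 ^ (max 0 ((Nat.size (max m 0).toNat : Int) - 3)).toNat := by
          calc (8 : Int) = 2 ^ 3 := by norm_num
          _ ≤ 2 ^ (max 0 ((Nat.size (max m 0).toNat : Int) - 3)).toNat :=
              pow_le_pow_right₀ (by norm_num) hk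
        simp [h1, h2, h3, min_eq_left h8]

-- the ladder is monotone, hence commutes with binary max
theorem ladder_mono {a b : Int} (h : a ≤ b) : pvLadder a ≤ pvLadder b := by
  unfold pvLadder; split_ifs <;> omega

theorem ladder_max (a b : Int) : pvLadder (max a b) = max (pvLadder a) (pvLadder b) := by
  rcases le_total a b with h | h
  · rw [max_eq_right h, max_eq_right (ladder_mono h)]
  · rw [max_eq_left h, max_eq_left (ladder_mono h)]

-- the ladder commutes with the running max over a list
theorem foldl_max_ladder (xs : List Int) (a : Int) :
    (xs.map pvLadder).foldl max (pvLadder a) = pvLadder (xs.foldl max a) := by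
  induction xs generalizing a with
  | nil => rfl
  | cons x t ih => simp only [List.map_cons, List.foldl_cons, ← ladder_max]; exact ih _

-- ===== VERDICT (by name: the statement is the Claim_ definition above) =====
theorem calc_register_size_spec : Claim_equal_calc_register_size := by
  intro fields _ _
  unfold Spec_calc_register_size calc_register_size calc_register_size_alt
  cases fields with
  | nil => simp
  | cons f fs =>
    have hmap : ∀ (l : List (List (String × Int))),
        l.map pvFieldSize
          = (l.map (fun h => (List.lookup "bit" h).getD 0 + (List.lookup "size" h).getD 0 - 1)).map pvLadder := by
      intro l
      rw [List.map_map]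
      exact List.map_congr_left (fun g _ => fieldSize_eq_ladder g)
    simp only [List.map_cons, PySem.List.max?_id_cons,
      if_neg (by simp : ¬ f :: fs = []), Option.getD_some]
    rw [hmap fs, fieldSize_eq_ladder f, foldl_max_ladder]
    rfl
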